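-- pv_equiv track=rewrite | github.com/ashmere/docgenai | src/docgenai/language/detector.py | get_language_group
-- ===== SOURCE A (Python) =====
-- def get_language_group(language: str) -> str:
--     """
--     Get the language group for semantic grouping.
--
--     Args:
--         language: Language identifier
--
--     Returns:
--         Language group (e.g., 'web_frontend', 'systems', 'devops')
--     """
--     groups = {
--         "web_frontend": ["javascript", "typescript", "jsx"],
--         "web_backend": ["python", "java", "go", "csharp", "php", "ruby"],
--         "systems": ["cpp", "c", "rust", "go"],
--         "mobile": ["swift", "kotlin", "java"],
--         "devops": ["terraform", "yaml", "shell", "dockerfile"],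
--         "data": ["python", "r", "sql", "scala"],
--         "config": ["json", "yaml", "toml", "ini", "xml"],
--         "documentation": ["markdown", "rst", "text"],
--     }
--
--     for group, languages in groups.items():
--         if language in languages:
--             return group
--
--     return "other"
-- ===== SOURCE B (Python) =====
-- # A flat language -> group table written directly (the inverse of A's groups
-- # table, with earlier groups winning for languages in several groups), so a
-- # call is one dict lookup with no loop over the groups.
-- _GROUP_OF = {
--     "javascript": "web_frontend",
--     "typescript": "web_frontend",
--     "jsx": "web_frontend",
--     "python": "web_backend",
--     "java": "web_backend",
--     "go": "web_backend",
--     "csharp": "web_backend",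
--     "php": "web_backend",
--     "ruby": "web_backend",
--     "cpp": "systems",
--     "c": "systems",
--     "rust": "systems",
--     "swift": "mobile",
--     "kotlin": "mobile",
--     "terraform": "devops",
--     "yaml": "devops",
--     "shell": "devops",
--     "dockerfile": "devops",
--     "r": "data",
--     "sql": "data",
--     "scala": "data",
--     "json": "config",
--     "toml": "config",
--     "ini": "config",
--     "xml": "config",
--     "markdown": "documentation",
--     "rst": "documentation",
--     "text": "documentation",
-- }
--
--
-- def get_language_group(language: str) -> str:
--     return _GROUP_OF.get(language, "other")
-- ===== Notes on version B (the rewrite author's own statement) =====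
-- stated objective: idiomatic
-- what changed: Replaces the per-call scan over a group->languages table with a flat language->group dict literal (hand-inverted, earlier groups winning for duplicates) and a single .get lookup with default 'other'.
import Mathlib
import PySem

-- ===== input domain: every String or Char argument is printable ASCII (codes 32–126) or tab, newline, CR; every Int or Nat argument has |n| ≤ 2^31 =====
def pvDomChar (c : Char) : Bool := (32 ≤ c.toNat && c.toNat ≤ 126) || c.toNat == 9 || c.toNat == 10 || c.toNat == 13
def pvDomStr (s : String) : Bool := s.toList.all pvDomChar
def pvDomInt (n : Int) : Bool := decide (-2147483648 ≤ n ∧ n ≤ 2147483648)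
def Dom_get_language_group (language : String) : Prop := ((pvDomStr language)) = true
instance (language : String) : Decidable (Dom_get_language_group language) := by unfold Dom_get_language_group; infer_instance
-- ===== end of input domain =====

-- B replaces A's per-call scan over the group->languages table with a flat
-- language->group dict literal (hand-inverted, earlier groups winning) and one
-- lookup; objective: idiomatic.

-- ===== PORT A =====
-- the literal groups dict of A, as an insertion-ordered association list
def pvGroupsA : List (String × List String) := [
  ("web_frontend", ["javascript", "typescript", "jsx"]),
  ("web_backend", ["python", "java", "go", "csharp", "php", "ruby"]),
  ("systems", ["cpp", "c", "rust", "go"]),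
  ("mobile", ["swift", "kotlin", "java"]),
  ("devops", ["terraform", "yaml", "shell", "dockerfile"]),
  ("data", ["python", "r", "sql", "scala"]),
  ("config", ["json", "yaml", "toml", "ini", "xml"]),
  ("documentation", ["markdown", "rst", "text"])]

-- the 'for group, languages in groups.items(): if language in languages: return group' loop
def pvLoopA (language : String) : List (String × List String) → String
  | [] => "other"
  | (group, languages) :: rest =>
      if languages.contains language then group else pvLoopA language rest

def get_language_group (language : String) : String :=
  pvLoopA language pvGroupsA

-- ===== PORT B =====
-- _GROUP_OF: Source B's flat language -> group dict literal
def pvGroupOf : PySem.Dict String String := PySem.Dict.mk [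
  ("javascript", "web_frontend"), ("typescript", "web_frontend"),
  ("jsx", "web_frontend"), ("python", "web_backend"), ("java", "web_backend"),
  ("go", "web_backend"), ("csharp", "web_backend"), ("php", "web_backend"),
  ("ruby", "web_backend"), ("cpp", "systems"), ("c", "systems"),
  ("rust", "systems"), ("swift", "mobile"), ("kotlin", "mobile"),
  ("terraform", "devops"), ("yaml", "devops"), ("shell", "devops"),
  ("dockerfile", "devops"), ("r", "data"), ("sql", "data"), ("scala", "data"),
  ("json", "config"), ("toml", "config"), ("ini", "config"), ("xml", "config"),
  ("markdown", "documentation"), ("rst", "documentation"),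
  ("text", "documentation")]

def get_language_group_alt (language : String) : String :=
  pvGroupOf.getD language "other"

-- ===== PRECONDITION & SPEC =====
def Spec_get_language_group (language : String) (out : String) : Prop := out = get_language_group_alt language
instance (language : String) (out : String) : Decidable (Spec_get_language_group language out) := by unfold Spec_get_language_group; infer_instance

-- ===== CLAIM (what is proved, stated in full; the proofs are below) =====
def Claim_equal_get_language_group : Prop := ∀ (language : String), Dom_get_language_group language → Spec_get_language_group language (get_language_group language)

-- ===== LEMMAS AND PROOFS =====

-- the distinct languages appearing anywhere in A's table (proof helper)
def pvAllLangs : List String :=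
  ["javascript", "typescript", "jsx", "python", "java", "go", "csharp", "php",
   "ruby", "cpp", "c", "rust", "swift", "kotlin", "terraform", "yaml", "shell",
   "dockerfile", "r", "sql", "scala", "json", "toml", "ini", "xml", "markdown",
   "rst", "text"]

-- ===== VERDICT (by name: the statement is the Claim_ definition above) =====
theorem get_language_group_spec : Claim_equal_get_language_group := by
  intro language _
  unfold Spec_get_language_group get_language_group get_language_group_alt
  by_cases h : language ∈ pvAllLangs
  · fin_cases h <;> decide
  · have hc : ∀ s : String, s ∈ pvAllLangs → (s == language) = false := by
      intro s hs
      simp only [beq_eq_false_iff_ne]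
      intro e; exact h (e ▸ hs)
    simp only [pvGroupsA, pvLoopA, List.contains_cons, List.contains_nil,
      pvGroupOf, PySem.Dict.getD_eq_get?_getD, PySem.Dict.get?_mk_cons]
    simp_all [pvAllLangs, PySem.Dict.get?]
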